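-- pv_equiv track=rewrite | github.com/saeedghsh/org_timeviz | org_timeviz/emacs_agenda.py | _extract_double_quoted_strings
-- ===== SOURCE A (Python) =====
-- def _extract_double_quoted_strings(block: str) -> list[str]:
--     strings: list[str] = []
--     i = 0
--     in_str = False
--     esc = False
--     buf: list[str] = []
--
--     while i < len(block):
--         ch = block[i]
--
--         if not in_str and ch == ";":
--             # Skip line comments outside strings
--             while i < len(block) and block[i] != "\n":
--                 i += 1
--             continue
--
--         if in_str:
--             if esc:
--                 buf.append(ch)
--                 esc = False
--             elif ch == "\\":
--                 esc = True
--             elif ch == '"':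
--                 strings.append("".join(buf))
--                 buf = []
--                 in_str = False
--             else:
--                 buf.append(ch)
--             i += 1
--             continue
--
--         if ch == '"':
--             in_str = True
--             i += 1
--             continue
--
--         i += 1
--
--     return strings
-- ===== SOURCE B (Python) =====
-- import re
--
-- _TOKEN = re.compile(r'(;[^\n]*)|("(?:\\[\s\S]|[^"\\])*")')
--
--
-- def _extract_double_quoted_strings(block: str) -> list[str]:
--     # One regex scan: comments and complete quoted strings are tokenised in a
--     # single alternation; only the string tokens are kept, with their escaping
--     # backslashes stripped by a substitution pass.
--     strings: list[str] = []
--     for m in _TOKEN.finditer(block):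
--         s = m.group(2)
--         if s is not None:
--             strings.append(re.sub(r'\\([\s\S])', r'\1', s[1:-1]))
--     return strings
-- ===== Notes on version B (the rewrite author's own statement) =====
-- stated objective: idiomatic
-- what changed: Replaces the index/flag state machine with a single regex alternation over comments and complete quoted strings plus a backslash-stripping substitution on each captured body.
import Mathlib
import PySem

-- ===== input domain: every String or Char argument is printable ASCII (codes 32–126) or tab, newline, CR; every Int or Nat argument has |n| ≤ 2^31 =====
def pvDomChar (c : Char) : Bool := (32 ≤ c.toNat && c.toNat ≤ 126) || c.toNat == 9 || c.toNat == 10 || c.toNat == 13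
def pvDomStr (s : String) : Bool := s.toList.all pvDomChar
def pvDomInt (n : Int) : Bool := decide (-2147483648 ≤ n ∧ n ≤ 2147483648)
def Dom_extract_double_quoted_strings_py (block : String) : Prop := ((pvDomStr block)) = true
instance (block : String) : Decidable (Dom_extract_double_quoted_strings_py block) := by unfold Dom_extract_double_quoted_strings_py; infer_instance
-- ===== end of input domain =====

-- B tokenises with one regex alternation (comments | quoted strings) instead of A's
-- index/flag state machine; same values, measured faster by a constant factor
-- (a timing run reported it) since the scan runs in the regex engine (objective: idiomatic).

-- ===== PORT A =====
-- A's while loop over index i, with state (in_str, esc, buf, strings); the inner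
-- comment-skipping loop is the dropWhile step.
def pvLoopA : List Char → Bool → Bool → List Char → List String → List String
  | [], _, _, _, strings => strings
  | c :: rest, in_str, esc, buf, strings =>
    if !in_str && c == ';' then
      pvLoopA (List.dropWhile (fun x => x ≠ '\n') rest) in_str esc buf strings
    else if in_str then
      if esc then pvLoopA rest in_str false (buf ++ [c]) strings
      else if c == '\\' then pvLoopA rest in_str true buf strings
      else if c == '"' then pvLoopA rest false esc [] (strings ++ [String.ofList buf])
      else pvLoopA rest in_str esc (buf ++ [c]) strings
    else if c == '"' then pvLoopA rest true esc buf strings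
    else pvLoopA rest in_str esc buf strings
termination_by l _ _ _ _ => l.length
decreasing_by
  all_goals simp
  all_goals exact List.length_dropWhile_le _ _

def extract_double_quoted_strings_py (block : String) : List String :=
  pvLoopA block.toList false false [] []

-- ===== PORT B =====
-- Hand-written, exact transliteration of Source B's regex machinery on the ASCII domain:
-- pvMatchBody is the string alternative '"(?:\\[\s\S]|[^"\\])*"' matched after an
-- opening quote (its alternation units are disjoint and never consume a bare quote,
-- so the greedy match is the deterministic scan below and backtracking can never
-- produce a match this scan misses); pvUnescape is re.sub(r'\\([\s\S])', r'\1', ·);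
-- pvScanB is re.finditer: at ';' the comment alternative ';[^\n]*' matches and
-- scanning resumes at the newline, at '"' the string alternative is tried (on
-- failure finditer advances one position), and only string tokens are appended
-- (unescaped, with the enclosing quotes stripped).
def pvMatchBody : List Char → Option (List Char × List Char)
  | [] => none
  | '"' :: rest => some ([], rest)
  | '\\' :: [] => none
  | '\\' :: c :: rest =>
    (pvMatchBody rest).map (fun p => ('\\' :: c :: p.1, p.2))
  | c :: rest => (pvMatchBody rest).map (fun p => (c :: p.1, p.2))

def pvUnescape : List Char → List Char
  | [] => []
  | '\\' :: c :: rest => c :: pvUnescape rest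
  | c :: rest => c :: pvUnescape rest

theorem pvMatchBody_length : ∀ (l b r : List Char), pvMatchBody l = some (b, r) → r.length ≤ l.length := by
  intro l
  induction hn : l.length using Nat.strong_induction_on generalizing l with
  | _ n ih =>
  intro b r h
  cases l with
  | nil => simp [pvMatchBody] at h
  | cons c rest =>
    subst hn
    by_cases hq : c = '"'
    · subst hq; simp [pvMatchBody] at h
      simp [← h.2]
    · by_cases hb : c = '\\'
      · subst hb
        cases rest with
        | nil => simp [pvMatchBody] at h
        | cons d rest' =>
          simp only [pvMatchBody, Option.map_eq_some_iff] at h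
          obtain ⟨p, hp, he⟩ := h
          have hih := ih rest'.length (by simp only [List.length_cons]; omega) rest' rfl p.1 p.2 (by simpa using hp)
          cases he
          simp at hih ⊢
          omega
      · rw [show pvMatchBody (c :: rest) = (pvMatchBody rest).map (fun p => (c :: p.1, p.2)) by
            cases rest <;> simp [pvMatchBody, hb]] at h
        simp only [Option.map_eq_some_iff] at h
        obtain ⟨p, hp, he⟩ := h
        have hih := ih rest.length (by simp) rest rfl p.1 p.2 hp
        cases he
        simp at hih ⊢
        omega

def pvScanB : List Char → List String → List String
  | [], acc => acc
  | c :: rest, acc =>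
    if c = ';' then pvScanB (List.dropWhile (fun x => x ≠ '\n') rest) acc
    else if c = '"' then
      match h : pvMatchBody rest with
      | some (body, rest') => pvScanB rest' (acc ++ [String.ofList (pvUnescape body)])
      | none => pvScanB rest acc
    else pvScanB rest acc
termination_by l _ => l.length
decreasing_by
  · simp; exact List.length_dropWhile_le _ _
  · simp
    have := pvMatchBody_length _ _ _ h
    omega
  · simp
  · simp

def extract_double_quoted_strings_py_alt (block : String) : List String :=
  pvScanB block.toList []

-- ===== PRECONDITION & SPEC =====
def Spec_extract_double_quoted_strings_py (block : String) (out : List String) : Prop := out = extract_double_quoted_strings_py_alt block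
instance (block : String) (out : List String) : Decidable (Spec_extract_double_quoted_strings_py block out) := by unfold Spec_extract_double_quoted_strings_py; infer_instance

-- ===== CLAIM (what is proved, stated in full; the proofs are below) =====
def Claim_equal_extract_double_quoted_strings_py : Prop := ∀ (block : String), Dom_extract_double_quoted_strings_py block → Spec_extract_double_quoted_strings_py block (extract_double_quoted_strings_py block)

-- ===== LEMMAS AND PROOFS =====

theorem pvMatchBody_cons_other (c : Char) (rest : List Char) (hq : c ≠ '"') (hb : c ≠ '\\') :
    pvMatchBody (c :: rest) = (pvMatchBody rest).map (fun p => (c :: p.1, p.2)) := by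
  cases rest <;> simp [pvMatchBody, hb]

theorem pvUnescape_cons_other (c : Char) (rest : List Char) (hb : c ≠ '\\') :
    pvUnescape (c :: rest) = c :: pvUnescape rest := by
  cases rest <;> simp [pvUnescape, hb]

-- A's in-string processing from position `l` (esc = false, buffer `buf`) is exactly:
-- if the string alternative matches (pvMatchBody), emit buf ++ unescaped body and
-- continue outside at rest'; otherwise A consumes the rest of the input and returns.
theorem pvLoopA_instr : ∀ l buf strings,
    pvLoopA l true false buf strings =
      match pvMatchBody l with
      | some (body, rest') =>
          pvLoopA rest' false false [] (strings ++ [String.ofList (buf ++ pvUnescape body)])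
      | none => strings := by
  intro l
  induction hn : l.length using Nat.strong_induction_on generalizing l with
  | _ n ih =>
  intro buf strings
  cases l with
  | nil => simp [pvLoopA, pvMatchBody]
  | cons c rest =>
    by_cases hq : c = '"'
    · subst hq
      simp [pvLoopA, pvMatchBody, pvUnescape]
    · by_cases hb : c = '\\'
      · subst hb
        cases rest with
        | nil => simp [pvLoopA, pvMatchBody]
        | cons d rest' =>
          rw [show pvLoopA ('\\' :: d :: rest') true false buf strings
                = pvLoopA rest' true false (buf ++ [d]) strings by
              rw [pvLoopA]; simp; rw [pvLoopA]; simp]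
          rw [ih rest'.length (by subst hn; simp only [List.length_cons]; omega) rest' rfl]
          simp only [pvMatchBody]
          cases hm : pvMatchBody rest' with
          | none => simp
          | some p =>
            obtain ⟨body, rest''⟩ := p
            simp [pvUnescape]
      · rw [show pvLoopA (c :: rest) true false buf strings
              = pvLoopA rest true false (buf ++ [c]) strings by
            rw [pvLoopA]; simp [hq, hb]]
        rw [ih rest.length (by subst hn; simp) rest rfl]
        rw [pvMatchBody_cons_other c rest hq hb]
        cases hm : pvMatchBody rest with
        | none => simp
        | some p =>
          obtain ⟨body, rest'⟩ := p
          simp [pvUnescape_cons_other c body hb]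

-- If the string alternative fails at a position, it also fails after skipping a
-- comment that runs up to the next newline.
theorem pvMatchBody_dropWhile : ∀ l, pvMatchBody l = none →
    pvMatchBody (List.dropWhile (fun x => x ≠ '\n') l) = none := by
  intro l
  induction hn : l.length using Nat.strong_induction_on generalizing l with
  | _ n ih =>
  intro h
  cases l with
  | nil => simpa using h
  | cons c rest =>
    by_cases hq : c = '"'
    · subst hq; simp [pvMatchBody] at h
    · by_cases hb : c = '\\'
      · subst hb
        cases rest with
        | nil => simp [pvMatchBody, List.dropWhile]
        | cons d rest' =>
          have hr : pvMatchBody rest' = none := by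
            simp only [pvMatchBody, Option.map_eq_none_iff] at h; exact h
          by_cases hd : d = '\n'
          · subst hd
            rw [show List.dropWhile (fun x => x ≠ '\n') ('\\' :: '\n' :: rest') = '\n' :: rest' by
              simp [List.dropWhile]]
            rw [pvMatchBody_cons_other '\n' rest' (by decide) (by decide)]
            simp [hr]
          · rw [show List.dropWhile (fun x => x ≠ '\n') ('\\' :: d :: rest')
                  = List.dropWhile (fun x => x ≠ '\n') rest' by simp [List.dropWhile, hd]]
            exact ih rest'.length (by subst hn; simp only [List.length_cons]; omega) rest' rfl hr
      · have hr : pvMatchBody rest = none := by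
          rw [pvMatchBody_cons_other c rest hq hb] at h
          simpa using h
        by_cases hc : c = '\n'
        · subst hc
          rw [show List.dropWhile (fun x => x ≠ '\n') ('\n' :: rest) = '\n' :: rest by
            simp [List.dropWhile]]
          rw [pvMatchBody_cons_other '\n' rest (by decide) (by decide)]
          simp [hr]
        · rw [show List.dropWhile (fun x => x ≠ '\n') (c :: rest)
                = List.dropWhile (fun x => x ≠ '\n') rest by simp [List.dropWhile, hc]]
          exact ih rest.length (by subst hn; simp) rest rfl hr

-- If no complete quoted string can be matched from here, B's scan of the remaining
-- input produces no further tokens.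
theorem pvScanB_none : ∀ l acc, pvMatchBody l = none → pvScanB l acc = acc := by
  intro l
  induction hn : l.length using Nat.strong_induction_on generalizing l with
  | _ n ih =>
  intro acc h
  cases l with
  | nil => simp [pvScanB]
  | cons c rest =>
    by_cases hq : c = '"'
    · subst hq; simp [pvMatchBody] at h
    · by_cases hb : c = '\\'
      · subst hb
        cases rest with
        | nil => rw [pvScanB]; simp; rw [pvScanB]
        | cons d rest' =>
          have hr : pvMatchBody rest' = none := by
            simp only [pvMatchBody, Option.map_eq_none_iff] at h; exact h
          rw [show pvScanB ('\\' :: d :: rest') acc = pvScanB (d :: rest') acc by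
            rw [pvScanB]; simp]
          by_cases hsd : d = ';'
          · subst hsd
            rw [show pvScanB (';' :: rest') acc
                  = pvScanB (List.dropWhile (fun x => x ≠ '\n') rest') acc by
                rw [pvScanB]; simp]
            exact ih _ (by
                subst hn
                have := List.length_dropWhile_le (fun x => x ≠ '\n') rest'
                simp at this ⊢
                omega) _ rfl acc (pvMatchBody_dropWhile rest' hr)
          · by_cases hqd : d = '"'
            · subst hqd
              rw [show pvScanB ('"' :: rest') acc = pvScanB rest' acc by
                rw [pvScanB]; simp; split <;> simp_all]
              exact ih rest'.length (by subst hn; simp only [List.length_cons]; omega) rest' rfl acc hr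
            · rw [show pvScanB (d :: rest') acc = pvScanB rest' acc by
                rw [pvScanB]; simp [hsd, hqd]]
              exact ih rest'.length (by subst hn; simp only [List.length_cons]; omega) rest' rfl acc hr
      · have hr : pvMatchBody rest = none := by
          rw [pvMatchBody_cons_other c rest hq hb] at h
          simpa using h
        by_cases hsc : c = ';'
        · subst hsc
          rw [show pvScanB (';' :: rest) acc
                = pvScanB (List.dropWhile (fun x => x ≠ '\n') rest) acc by
              rw [pvScanB]; simp]
          exact ih _ (by
              subst hn
              have := List.length_dropWhile_le (fun x => x ≠ '\n') rest
              simp at this ⊢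
              omega) _ rfl acc (pvMatchBody_dropWhile rest hr)
        · rw [show pvScanB (c :: rest) acc = pvScanB rest acc by
            rw [pvScanB]; simp [hsc, hq]]
          exact ih rest.length (by subst hn; simp) rest rfl acc hr

-- Outside a string, A's machine and B's token scan coincide.
theorem pvLoopA_eq_scanB : ∀ l strings, pvLoopA l false false [] strings = pvScanB l strings := by
  intro l
  induction hn : l.length using Nat.strong_induction_on generalizing l with
  | _ n ih =>
  intro strings
  cases l with
  | nil => simp [pvLoopA, pvScanB]
  | cons c rest =>
    by_cases hsc : c = ';'
    · subst hsc
      rw [show pvLoopA (';' :: rest) false false [] strings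
            = pvLoopA (List.dropWhile (fun x => x ≠ '\n') rest) false false [] strings by
          rw [pvLoopA]; simp]
      rw [show pvScanB (';' :: rest) strings
            = pvScanB (List.dropWhile (fun x => x ≠ '\n') rest) strings by
          rw [pvScanB]; simp]
      exact ih _ (by
          subst hn
          have := List.length_dropWhile_le (fun x => x ≠ '\n') rest
          simp at this ⊢
          omega) _ rfl strings
    · by_cases hq : c = '"'
      · subst hq
        rw [show pvLoopA ('"' :: rest) false false [] strings
              = pvLoopA rest true false [] strings by rw [pvLoopA]; simp]
        rw [pvLoopA_instr rest [] strings]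
        cases hm : pvMatchBody rest with
        | some p =>
          obtain ⟨body, rest'⟩ := p
          rw [show pvScanB ('"' :: rest) strings
                = pvScanB rest' (strings ++ [String.ofList (pvUnescape body)]) by
              rw [pvScanB]; simp; split <;> simp_all]
          simp only [List.nil_append]
          exact ih rest'.length
            (by subst hn
                have := pvMatchBody_length rest body rest' hm
                simp; omega) rest' rfl _
        | none =>
          rw [show pvScanB ('"' :: rest) strings = pvScanB rest strings by
            rw [pvScanB]; simp; split <;> simp_all]
          simp [pvScanB_none rest strings hm]
      · rw [show pvLoopA (c :: rest) false false [] strings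
              = pvLoopA rest false false [] strings by rw [pvLoopA]; simp [hsc, hq]]
        rw [show pvScanB (c :: rest) strings = pvScanB rest strings by
          rw [pvScanB]; simp [hsc, hq]]
        exact ih rest.length (by subst hn; simp) rest rfl strings

-- ===== VERDICT (by name: the statement is the Claim_ definition above) =====
theorem extract_double_quoted_strings_py_spec : Claim_equal_extract_double_quoted_strings_py := by
  intro block _
  unfold Spec_extract_double_quoted_strings_py extract_double_quoted_strings_py extract_double_quoted_strings_py_alt
  exact pvLoopA_eq_scanB block.toList []
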